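-- pv_equiv track=rewrite | github.com/Miguel-Antonio-Logarta/My-Notes | CSC520/L4_Miguel_Logarta.py | L4
-- ===== SOURCE A (Python) =====
-- def L4(inString: str) -> str:
--     # For lab #4, add code that  computes the counts of non-negative
--     # ints equal to 0, 1 and 2 mod 3, and returns 'yes' if the 3
--     # counts are the same; otherwise, L4 returns 'no'.
--
--     # inString is a string of space delimited integers
--     # Parse the string and read it as numbers
--     numbers = [int(n) for n in inString.split()]
--
--     # We are going to count the values of the remainders after dividing by 3
--     # After doing (number)%3, we have three possible results: 0, 1, and 2
--     zeroesCount = 0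
--     onesCount = 0
--     twosCount = 0
--
--     for num in numbers:
--         if num >= 0:   # Ignore negative numbers
--             remainder = num % 3
--             if remainder == 0:
--                 zeroesCount += 1
--             elif remainder == 1:
--                 onesCount += 1
--             elif remainder == 2:
--                 twosCount += 1
--
--     # If the counts are all the same, return 'yes' else  'no'
--     if zeroesCount == onesCount == twosCount :
--         return 'yes'
--     else:
--         return 'no'
-- ===== SOURCE B (Python) =====
-- def L4(inString: str) -> str:
--     # Sort the remainders and compare against the canonical shape
--     # [0]*k + [1]*k + [2]*k: the three counts are equal iff the sorted
--     # remainder list has exactly that form (with len divisible by 3).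
--     rems = sorted(int(n) % 3 for n in inString.split() if int(n) >= 0)
--     k, r = divmod(len(rems), 3)
--     return 'yes' if r == 0 and rems == [0]*k + [1]*k + [2]*k else 'no'
-- ===== Notes on version B (the rewrite author's own statement) =====
-- stated objective: alternative
-- what changed: Replaces the three-counter counting loop with sort-then-structural-comparison: sort the mod-3 remainders of the non-negative ints and test whether the sorted list equals the canonical pattern [0]*k+[1]*k+[2]*k with k = len/3.
import Mathlib
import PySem

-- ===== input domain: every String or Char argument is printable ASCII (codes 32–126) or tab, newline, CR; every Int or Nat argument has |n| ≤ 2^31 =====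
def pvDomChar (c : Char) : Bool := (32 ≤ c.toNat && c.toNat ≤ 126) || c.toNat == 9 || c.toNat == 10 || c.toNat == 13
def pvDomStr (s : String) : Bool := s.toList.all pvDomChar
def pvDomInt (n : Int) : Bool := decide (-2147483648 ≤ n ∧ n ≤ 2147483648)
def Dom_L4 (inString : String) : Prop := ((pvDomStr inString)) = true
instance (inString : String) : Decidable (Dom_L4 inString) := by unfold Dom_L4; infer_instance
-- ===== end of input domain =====

-- B sorts the mod-3 remainders of the non-negative ints and compares the sorted
-- list with the canonical pattern [0]*k + [1]*k + [2]*k, instead of A's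
-- three-counter accumulating pass; same outputs.

-- ===== PORT A =====
-- the body of A's counting loop, as a named step function
def l4Step (s : Int × Int × Int) (num : Int) : Int × Int × Int :=
  if num ≥ 0 then
    let remainder := PySem.Int.mod num 3
    if remainder = 0 then (s.1 + 1, s.2.1, s.2.2)
    else if remainder = 1 then (s.1, s.2.1 + 1, s.2.2)
    else if remainder = 2 then (s.1, s.2.1, s.2.2 + 1)
    else s
  else s

-- int(n) is total here via getD 0; Pre_L4 guarantees every token parses (else Python raises ValueError)
def L4 (inString : String) : String :=
  let numbers : List Int := (PySem.Str.split₀ inString).map (fun t => (PySem.Int.ofStr? t).getD 0)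
  let counts : Int × Int × Int := numbers.foldl l4Step (0, 0, 0)
  if counts.1 = counts.2.1 ∧ counts.2.1 = counts.2.2 then "yes" else "no"

-- ===== PORT B =====
def L4_alt (inString : String) : String :=
  let rems : List Int :=
    PySem.List.sorted
      ((((PySem.Str.split₀ inString).map (fun t => (PySem.Int.ofStr? t).getD 0)).filter
        (fun n => decide (n ≥ 0))).map (fun n => PySem.Int.mod n 3)) (fun x => x) false
  let k := rems.length / 3
  let r := rems.length % 3
  if r = 0 ∧ rems = List.replicate k 0 ++ List.replicate k 1 ++ List.replicate k 2
  then "yes" else "no"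

-- ===== PRECONDITION & SPEC =====
-- Pre_: every whitespace-separated token parses as a Python int (otherwise A raises ValueError)
def Pre_L4 (inString : String) : Prop :=
  ∀ t ∈ PySem.Str.split₀ inString, (PySem.Int.ofStr? t).isSome = true
instance (inString : String) : Decidable (Pre_L4 inString) := by unfold Pre_L4; infer_instance
def pvWitness_L4 : String := "0 1 2 -7"

def Spec_L4 (inString : String) (out : String) : Prop := out = L4_alt inString
instance (inString : String) (out : String) : Decidable (Spec_L4 inString out) := by unfold Spec_L4; infer_instance

-- ===== CLAIM (what is proved, stated in full; the proofs are below) =====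
def Claim_equal_L4 : Prop := ∀ (inString : String), Dom_L4 inString → Pre_L4 inString → Spec_L4 inString (L4 inString)

-- ===== LEMMAS AND PROOFS =====

-- A's counting loop, over any list of ints, accumulates exactly the three counts
-- of the remainder list B builds.
theorem L4_loop_eq_counts (nums : List Int) (z o t : Int) :
    nums.foldl l4Step (z, o, t)
    = (z + PySem.List.count ((nums.filter (fun n => decide (n ≥ 0))).map (fun n => PySem.Int.mod n 3)) 0,
       o + PySem.List.count ((nums.filter (fun n => decide (n ≥ 0))).map (fun n => PySem.Int.mod n 3)) 1,
       t + PySem.List.count ((nums.filter (fun n => decide (n ≥ 0))).map (fun n => PySem.Int.mod n 3)) 2) := by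
  induction nums generalizing z o t with
  | nil => simp [PySem.List.count_eq]
  | cons n ns ih =>
    rw [List.foldl_cons]
    by_cases hn : n ≥ 0
    · have h0 : (0:Int) ≤ PySem.Int.mod n 3 := PySem.Int.mod_nonneg n (by norm_num)
      have h3 : PySem.Int.mod n 3 < 3 := PySem.Int.mod_lt n (by norm_num)
      have hf : List.filter (fun n => decide (n ≥ 0)) (n :: ns)
          = n :: List.filter (fun n => decide (n ≥ 0)) ns :=
        List.filter_cons_of_pos (by simpa using hn)
      have hmod : PySem.Int.mod n 3 = n % 3 := PySem.Int.mod_eq_emod_of_pos (by norm_num)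
      rcases (by omega : PySem.Int.mod n 3 = 0 ∨ PySem.Int.mod n 3 = 1 ∨ PySem.Int.mod n 3 = 2)
        with h | h | h
      · have hm : n % 3 = 0 := by omega
        have hstep : l4Step (z, o, t) n = (z + 1, o, t) := by simp [l4Step, hn, hm]
        rw [hstep, ih, hf]
        simp [PySem.List.count_eq, hm]
        omega
      · have hm : n % 3 = 1 := by omega
        have hstep : l4Step (z, o, t) n = (z, o + 1, t) := by simp [l4Step, hn, hm]
        rw [hstep, ih, hf]
        simp [PySem.List.count_eq, hm]
        omega
      · have hm : n % 3 = 2 := by omega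
        have hstep : l4Step (z, o, t) n = (z, o, t + 1) := by simp [l4Step, hn, hm]
        rw [hstep, ih, hf]
        simp [PySem.List.count_eq, hm]
        omega
    · have hf : List.filter (fun n => decide (n ≥ 0)) (n :: ns)
          = List.filter (fun n => decide (n ≥ 0)) ns :=
        List.filter_cons_of_neg (by simpa using hn)
      have hstep : l4Step (z, o, t) n = (z, o, t) := by
        simp only [l4Step]; rw [if_neg hn]
      rw [hstep, ih, hf]

-- sorted of a {0,1,2}-valued list is the canonical block of replicates
theorem L4_sorted_char (l : List Int) (h : ∀ x ∈ l, x = 0 ∨ x = 1 ∨ x = 2) :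
    PySem.List.sorted l (fun x => x) false
      = List.replicate (l.count 0) 0 ++ List.replicate (l.count 1) 1 ++ List.replicate (l.count 2) 2 := by
  apply PySem.List.sorted_id_eq_of_perm_of_pairwise
  · rw [List.perm_iff_count]
    intro a
    by_cases h0 : a = 0
    · simp [h0, List.count_append, List.count_replicate]
    · by_cases h1 : a = 1
      · simp [h1, List.count_append, List.count_replicate]
      · by_cases h2 : a = 2
        · simp [h2, List.count_append, List.count_replicate]
        · have hnl : a ∉ l := fun hm => by rcases h a hm with h|h|h <;> simp_all
          have hc : List.count a l = 0 := List.count_eq_zero.mpr hnl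
          simp [List.count_append, List.count_replicate, hc]
          exact ⟨fun h' => absurd h'.symm h0, fun h' => absurd h'.symm h1,
                 fun h' => absurd h'.symm h2⟩
  · rw [List.pairwise_append]
    refine ⟨?_, List.pairwise_replicate.mpr (Or.inr le_rfl), ?_⟩
    · rw [List.pairwise_append]
      refine ⟨List.pairwise_replicate.mpr (Or.inr le_rfl),
              List.pairwise_replicate.mpr (Or.inr le_rfl), ?_⟩
      intro a ha b hb
      rw [List.eq_of_mem_replicate ha, List.eq_of_mem_replicate hb]
      norm_num
    · intro a ha b hb
      rw [List.eq_of_mem_replicate hb]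
      rcases List.mem_append.mp ha with h' | h' <;>
        rw [List.eq_of_mem_replicate h'] <;> norm_num

-- length of a {0,1,2}-valued list is the sum of the three counts
theorem L4_len_eq (l : List Int) (h : ∀ x ∈ l, x = 0 ∨ x = 1 ∨ x = 2) :
    l.length = l.count 0 + l.count 1 + l.count 2 := by
  have h' := congrArg List.length (L4_sorted_char l h)
  simp [PySem.List.length_sorted] at h'
  omega

-- ===== VERDICT (by name: the statement is the Claim_ definition above) =====
theorem L4_spec : Claim_equal_L4 := by
  intro s _ _
  unfold Spec_L4
  set nums : List Int := (PySem.Str.split₀ s).map (fun t => (PySem.Int.ofStr? t).getD 0) with hnums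
  set rems : List Int :=
    ((nums.filter (fun n => decide (n ≥ 0))).map (fun n => PySem.Int.mod n 3)) with hrems
  have hmem : ∀ x ∈ rems, x = 0 ∨ x = 1 ∨ x = 2 := by
    intro x hx
    rw [hrems] at hx
    rcases List.mem_map.mp hx with ⟨n, _, rfl⟩
    have h0 : (0:Int) ≤ PySem.Int.mod n 3 := PySem.Int.mod_nonneg n (by norm_num)
    have h3 : PySem.Int.mod n 3 < 3 := PySem.Int.mod_lt n (by norm_num)
    omega
  have hchar := L4_sorted_char rems hmem
  have hlen := L4_len_eq rems hmem
  simp only [L4, L4_alt, ← hnums, ← hrems, L4_loop_eq_counts, zero_add,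
    PySem.List.count_eq, PySem.List.length_sorted]
  rw [hchar]
  by_cases heq : rems.count 0 = rems.count 1 ∧ rems.count 1 = rems.count 2
  · obtain ⟨h01, h12⟩ := heq
    have hk : rems.length / 3 = rems.count 0 := by omega
    have hr : rems.length % 3 = 0 := by omega
    have hA : ((rems.count 0 : Int) = (rems.count 1 : Nat) ∧ ((rems.count 1 : Nat) : Int) = (rems.count 2 : Nat)) :=
      ⟨by exact_mod_cast h01, by exact_mod_cast h12⟩
    rw [if_pos hA, if_pos ⟨hr, by rw [hk, ← h01, ← h01.trans h12]⟩]
  · rw [if_neg (by exact_mod_cast heq), if_neg]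
    rintro ⟨-, habs⟩
    have hc0 := congrArg (List.count (0:Int)) habs
    have hc1 := congrArg (List.count (1:Int)) habs
    have hc2 := congrArg (List.count (2:Int)) habs
    simp [List.count_append, List.count_replicate] at hc0 hc1 hc2
    exact heq ⟨by omega, by omega⟩
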